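-- pv_equiv track=rewrite | github.com/centry-core/shared | filters.py | tag_format
-- ===== SOURCE A (Python) =====
-- def tag_format(tags):
--     badge_classes = {
--         'badge-primary': 0,
--         'badge-secondary': 0,
--         'badge-success': 0,
--         'badge-danger': 0,
--         'badge-warning': 0,
--         'badge-info': 0,
--         'badge-light': 0,
--         'badge-dark': 0,
--     }
--     tag_badge_mapping = dict()
--
--     result = []
--     for tag in tags:
--         chosen_class = tag_badge_mapping.get(tag, sorted(badge_classes, key=badge_classes.get)[0])
--         badge_classes[chosen_class] += 1
--         tag_badge_mapping[tag] = chosen_class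
--         result.append(f'<span class="badge mr-1 {chosen_class}">{tag}</span>')
--
--     return ''.join(result)
-- ===== SOURCE B (Python) =====
-- def tag_format(tags):
--     classes = ('badge-primary', 'badge-secondary', 'badge-success', 'badge-danger',
--                'badge-warning', 'badge-info', 'badge-light', 'badge-dark')
--     # scheduling queue: (uses, class_index) pairs kept sorted ascending; head = next class to hand out
--     pq = [(0, i) for i in range(8)]
--     assigned = {}
--     for tag in tags:
--         if tag in assigned:
--             i = assigned[tag]
--             k = next(p for p, e in enumerate(pq) if e[1] == i)
--         else:
--             i = pq[0][1]
--             assigned[tag] = i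
--             k = 0
--         c = pq.pop(k)[0] + 1
--         j = 0
--         while j < len(pq) and pq[j] < (c, i):
--             j += 1
--         pq.insert(j, (c, i))
--     return ''.join(f'<span class="badge mr-1 {classes[assigned[t]]}">{t}</span>' for t in tags)
-- ===== Notes on version B (the rewrite author's own statement) =====
-- stated objective: alternative
-- what changed: B drops A's per-class count dict and per-iteration sorted-by-count scan: it keeps an incrementally maintained sorted scheduling queue of (uses, class_index) pairs (new tag = pop the head, repeat tag = pop its entry; re-insert at the sorted position), and builds the HTML in a separate second pass from the tag->index cache.
import Mathlib
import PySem

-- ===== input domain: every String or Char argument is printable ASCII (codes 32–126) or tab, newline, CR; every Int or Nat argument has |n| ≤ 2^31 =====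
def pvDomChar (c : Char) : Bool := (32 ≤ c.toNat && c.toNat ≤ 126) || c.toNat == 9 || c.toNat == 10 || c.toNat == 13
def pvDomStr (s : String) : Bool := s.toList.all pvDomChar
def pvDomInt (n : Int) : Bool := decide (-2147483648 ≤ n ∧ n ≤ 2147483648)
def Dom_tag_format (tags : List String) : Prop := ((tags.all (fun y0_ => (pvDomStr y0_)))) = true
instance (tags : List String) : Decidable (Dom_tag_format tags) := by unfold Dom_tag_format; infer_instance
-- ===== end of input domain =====

-- B replaces A's per-class count dict with its per-iteration sorted scan by an incrementally
-- maintained sorted scheduling queue of (uses, class-index) pairs (pop / positional re-insert,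
-- head = next class to hand out) and renders the HTML in a separate second pass from the cache.

-- ===== PORT A =====
-- the literal badge_classes dict A builds at the top of each call
def tfBadge0 : PySem.Dict String Int :=
  PySem.Dict.ofList [("badge-primary", 0), ("badge-secondary", 0), ("badge-success", 0),
    ("badge-danger", 0), ("badge-warning", 0), ("badge-info", 0), ("badge-light", 0), ("badge-dark", 0)]

-- one iteration of A's for-loop; state = (badge_classes, tag_badge_mapping, result)
def tfStepA (st : PySem.Dict String Int × PySem.Dict String String × List String) (tag : String) :
    PySem.Dict String Int × PySem.Dict String String × List String :=
  -- sorted(badge_classes, key=badge_classes.get)[0]: every key of badge_classes is present, so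
  -- badge_classes.get k = getD k 0 here, and the keys list always has 8 elements, so the [0]
  -- indexing never raises and is the head (headD's default is unreachable)
  let chosen := (st.2.1.get? tag).getD
    ((PySem.List.sorted st.1.keys (fun k => st.1.getD k 0) false).headD "")
  (st.1.modify chosen 0 (· + 1),            -- badge_classes[chosen_class] += 1 (key always present)
   st.2.1.insert tag chosen,                -- tag_badge_mapping[tag] = chosen_class
   st.2.2 ++ ["<span class=\"badge mr-1 " ++ chosen ++ "\">" ++ tag ++ "</span>"])

def tag_format (tags : List String) : String :=
  PySem.Str.join "" (tags.foldl tfStepA (tfBadge0, PySem.Dict.empty, [])).2.2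

-- ===== PORT B =====
def tfClasses : List String :=
  ["badge-primary", "badge-secondary", "badge-success", "badge-danger",
   "badge-warning", "badge-info", "badge-light", "badge-dark"]

-- Python's tuple '<' on pairs of ints (lexicographic), as the while-loop condition uses it
def tfTupLt (a b : Int × Int) : Bool := a.1 < b.1 || (a.1 == b.1 && a.2 < b.2)

-- the 'j = 0; while j < len(pq) and pq[j] < (c, i): j += 1' loop
def tfInsPos (pq : List (Int × Int)) (x : Int × Int) : Nat :=
  match pq with
  | [] => 0
  | e :: t => if tfTupLt e x then tfInsPos t x + 1 else 0

-- one iteration of B's for-loop; state = (pq, assigned)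
def tfStepB (st : List (Int × Int) × PySem.Dict String Int) (tag : String) :
    List (Int × Int) × PySem.Dict String Int :=
  let ik : Int × Nat × PySem.Dict String Int :=
    match st.2.get? tag with
    -- k = next(p for p, e in enumerate(pq) if e[1] == i): always found (pq holds all 8 classes)
    | some i => (i, st.1.findIdx (fun e => e.2 == i), st.2)
    -- i = pq[0][1]; pq is never empty, so the headD default is unreachable
    | none => ((st.1.headD (0, 0)).2, 0, st.2.insert tag (st.1.headD (0, 0)).2)
  let i := ik.1
  let k := ik.2.1
  let assigned := ik.2.2
  let c := (st.1.getD k (0, 0)).1 + 1  -- pq.pop(k)[0] + 1; k always in range, so getD + eraseIdx is exactly pop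
  let pq' := st.1.eraseIdx k
  -- pq.insert(j, (c, i)) with j ≤ len(pq'), so insertIdx is exact
  (pq'.insertIdx (tfInsPos pq' (c, i)) (c, i), assigned)

-- one span of the final ''.join(f'...{classes[assigned[t]]}...' for t in tags)
-- (assigned[t] never raises: every processed tag was stored; 0 ≤ index < 8, so the defaults are unreachable)
def tfRender (assigned : PySem.Dict String Int) (t : String) : String :=
  "<span class=\"badge mr-1 " ++ PySem.List.pyGetD tfClasses (assigned.getD t 0) "" ++ "\">" ++ t ++ "</span>"

def tag_format_alt (tags : List String) : String :=
  let st := tags.foldl tfStepB ((PySem.List.pyRange 0 8).map (fun i => ((0 : Int), i)), PySem.Dict.empty)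
  PySem.Str.join "" (tags.map (tfRender st.2))

-- ===== PRECONDITION & SPEC =====
def Spec_tag_format (tags : List String) (out : String) : Prop := out = tag_format_alt tags
instance (tags : List String) (out : String) : Decidable (Spec_tag_format tags out) := by unfold Spec_tag_format; infer_instance

-- ===== CLAIM (what is proved, stated in full; the proofs are below) =====
def Claim_equal_tag_format : Prop := ∀ (tags : List String), Dom_tag_format tags → Spec_tag_format tags (tag_format tags)

-- ===== LEMMAS AND PROOFS =====

-- ---- generic facts about the tuple order and the insertion position ----

lemma tfTupLt_trans {a b c : Int × Int} (h1 : tfTupLt a b = true) (h2 : tfTupLt b c = true) :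
    tfTupLt a c = true := by
  simp only [tfTupLt, Bool.or_eq_true, Bool.and_eq_true, decide_eq_true_eq, beq_iff_eq] at *
  omega

lemma tfTupLt_total {a b : Int × Int} (h : a.2 ≠ b.2) :
    tfTupLt a b = true ∨ tfTupLt b a = true := by
  simp only [tfTupLt, Bool.or_eq_true, Bool.and_eq_true, decide_eq_true_eq, beq_iff_eq]
  omega

lemma tfInsPos_le (pq : List (Int × Int)) (x : Int × Int) : tfInsPos pq x ≤ pq.length := by
  induction pq with
  | nil => simp [tfInsPos]
  | cons e t ih =>
    simp only [tfInsPos, List.length_cons]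
    split_ifs <;> omega

lemma tfInsert_pairwise (pq : List (Int × Int)) (x : Int × Int)
    (hpw : pq.Pairwise (fun a b => tfTupLt a b = true)) (hd : ∀ y ∈ pq, y.2 ≠ x.2) :
    (pq.insertIdx (tfInsPos pq x) x).Pairwise (fun a b => tfTupLt a b = true) := by
  induction pq with
  | nil => simp [tfInsPos]
  | cons e t ih =>
    have hpt := (List.pairwise_cons.mp hpw).2
    have hpe := (List.pairwise_cons.mp hpw).1
    by_cases h : tfTupLt e x = true
    · rw [show tfInsPos (e :: t) x = tfInsPos t x + 1 by simp [tfInsPos, h],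
        List.insertIdx_succ_cons]
      refine List.pairwise_cons.mpr ⟨?_, ih hpt (fun y hy => hd y (by simp [hy]))⟩
      intro y hy
      rcases (List.mem_insertIdx (tfInsPos_le t x)).mp hy with rfl | hyt
      · exact h
      · exact hpe y hyt
    · rw [show tfInsPos (e :: t) x = 0 by simp [tfInsPos, h], List.insertIdx_zero]
      have hxe : tfTupLt x e = true := by
        rcases tfTupLt_total (show (x : Int × Int).2 ≠ e.2 from fun he => hd e (by simp) he.symm)
          with h' | h'
        · exact h'
        · exact absurd h' h
      refine List.pairwise_cons.mpr ⟨?_, hpw⟩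
      intro y hy
      rcases List.mem_cons.mp hy with rfl | hyt
      · exact hxe
      · exact tfTupLt_trans hxe (hpe y hyt)

-- ---- the pair list ⟨count, index⟩ tracked by B's queue ----

def tfPairs (counts : List Int) : List (Int × Int) :=
  (PySem.List.pyRange 0 8).map (fun i => (PySem.List.pyGetD counts i 0, i))

lemma tfRange8 : PySem.List.pyRange 0 8 = [0, 1, 2, 3, 4, 5, 6, 7] := by decide

lemma tfCounts8 : ∀ (counts : List Int), counts.length = 8 →
    ∃ a b c d e f g hh, counts = [a, b, c, d, e, f, g, hh]
  | [a, b, c, d, e, f, g, hh], _ => ⟨a, b, c, d, e, f, g, hh, rfl⟩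
  | [], h => by simp at h
  | [_], h => by simp at h
  | [_, _], h => by simp at h
  | [_, _, _], h => by simp at h
  | [_, _, _, _], h => by simp at h
  | [_, _, _, _, _], h => by simp at h
  | [_, _, _, _, _, _], h => by simp at h
  | [_, _, _, _, _, _, _], h => by simp at h
  | _ :: _ :: _ :: _ :: _ :: _ :: _ :: _ :: _ :: _, h => by simp at h

lemma tfPairsLit (counts : List Int) : tfPairs counts =
    [(PySem.List.pyGetD counts 0 0, 0), (PySem.List.pyGetD counts 1 0, 1),
     (PySem.List.pyGetD counts 2 0, 2), (PySem.List.pyGetD counts 3 0, 3),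
     (PySem.List.pyGetD counts 4 0, 4), (PySem.List.pyGetD counts 5 0, 5),
     (PySem.List.pyGetD counts 6 0, 6), (PySem.List.pyGetD counts 7 0, 7)] := by
  rw [tfPairs, tfRange8]; rfl

lemma tfPairs_length (counts : List Int) : (tfPairs counts).length = 8 := by
  rw [tfPairsLit]; rfl

lemma tfPairs_map_snd (counts : List Int) :
    (tfPairs counts).map Prod.snd = [0, 1, 2, 3, 4, 5, 6, 7] := by
  rw [tfPairsLit]; rfl

lemma tfMemPairs (counts : List Int) (i : Int) (h0 : 0 ≤ i) (h8 : i < 8) :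
    (PySem.List.pyGetD counts i 0, i) ∈ tfPairs counts := by
  rw [tfPairsLit]
  interval_cases i <;> simp

lemma tfPairs_mem_inv (counts : List Int) (p : Int × Int) (hp : p ∈ tfPairs counts) :
    ∃ j : Int, 0 ≤ j ∧ j < 8 ∧ p = (PySem.List.pyGetD counts j 0, j) := by
  rw [tfPairsLit] at hp
  simp only [List.mem_cons, List.not_mem_nil, or_false] at hp
  rcases hp with h | h | h | h | h | h | h | h
  · exact ⟨0, by norm_num, by norm_num, h⟩
  · exact ⟨1, by norm_num, by norm_num, h⟩
  · exact ⟨2, by norm_num, by norm_num, h⟩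
  · exact ⟨3, by norm_num, by norm_num, h⟩
  · exact ⟨4, by norm_num, by norm_num, h⟩
  · exact ⟨5, by norm_num, by norm_num, h⟩
  · exact ⟨6, by norm_num, by norm_num, h⟩
  · exact ⟨7, by norm_num, by norm_num, h⟩

lemma tfPairs_set (counts : List Int) (i : Int) (c : Int)
    (hlen : counts.length = 8) (h0 : 0 ≤ i) (h8 : i < 8) :
    tfPairs (counts.set i.toNat c) = (tfPairs counts).set i.toNat (c, i) := by
  obtain ⟨a, b, c', d, e, f, g, hh, rfl⟩ := tfCounts8 counts hlen
  interval_cases i <;> rfl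

lemma tfPairs_getElem_eq (counts : List Int) (i : Int)
    (hlen : counts.length = 8) (h0 : 0 ≤ i) (h8 : i < 8)
    (hiN : i.toNat < (tfPairs counts).length) :
    (tfPairs counts)[i.toNat] = (PySem.List.pyGetD counts i 0, i) := by
  obtain ⟨a, b, c', d, e, f, g, hh, rfl⟩ := tfCounts8 counts hlen
  interval_cases i <;> rfl

-- ---- the first-minimum characterisation of Python's min / of A's sorted head ----

-- the step of PySem.List.min? (first-minimum fold)
def tfMinStep {α : Type} (key : α → Int) (acc : Option α) (x : α) : Option α :=
  match acc with
  | none => some x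
  | some m => if key x < key m then some x else some m

lemma tfMin?_eq_foldl {α : Type} (xs : List α) (key : α → Int) :
    PySem.List.min? xs key = xs.foldl (tfMinStep key) none := rfl

lemma tfMinAux {α : Type} (key : α → Int) :
    ∀ (xs : List α) (a : α),
      (xs.foldl (tfMinStep key) (some a) = some a ∧ ∀ x ∈ xs, key a ≤ key x) ∨
      (∃ m l1 l2, xs.foldl (tfMinStep key) (some a) = some m ∧ xs = l1 ++ m :: l2 ∧
        key m < key a ∧ ∀ x ∈ l1, key m < key x) := by
  intro xs
  induction xs with
  | nil => intro a; exact Or.inl ⟨rfl, by simp⟩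
  | cons x t ih =>
    intro a
    by_cases hx : key x < key a
    · have hstep : tfMinStep key (some a) x = some x := by simp [tfMinStep, hx]
      rcases ih x with ⟨he, hall⟩ | ⟨m, l1, l2, he, ht, hma, hl1⟩
      · exact Or.inr ⟨x, [], t, by simpa [hstep] using he, rfl, hx, by simp⟩
      · refine Or.inr ⟨m, x :: l1, l2, by simpa [hstep] using he, by rw [ht]; rfl, by omega, ?_⟩
        intro y hy
        rcases List.mem_cons.mp hy with rfl | hyl
        · exact hma
        · exact hl1 y hyl
    · have hstep : tfMinStep key (some a) x = some a := by simp [tfMinStep, hx]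
      rcases ih a with ⟨he, hall⟩ | ⟨m, l1, l2, he, ht, hma, hl1⟩
      · refine Or.inl ⟨by simpa [hstep] using he, ?_⟩
        intro y hy
        rcases List.mem_cons.mp hy with rfl | hyt
        · omega
        · exact hall y hyt
      · refine Or.inr ⟨m, x :: l1, l2, by simpa [hstep] using he, by rw [ht]; rfl, hma, ?_⟩
        intro y hy
        rcases List.mem_cons.mp hy with rfl | hyl
        · omega
        · exact hl1 y hyl

lemma tfMinFirst {α : Type} (xs : List α) (key : α → Int) (m : α)
    (h : PySem.List.min? xs key = some m) :
    ∃ l1 l2, xs = l1 ++ m :: l2 ∧ ∀ x ∈ l1, key m < key x := by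
  cases xs with
  | nil => exact absurd h (by simp [tfMin?_eq_foldl])
  | cons x t =>
    rw [tfMin?_eq_foldl] at h
    simp only [List.foldl_cons, show tfMinStep key none x = some x from rfl] at h
    rcases tfMinAux key t x with ⟨he, hall⟩ | ⟨m', l1, l2, he, ht, hma, hl1⟩
    · rw [he] at h
      cases h
      exact ⟨[], t, rfl, by simp⟩
    · rw [he] at h
      cases h
      refine ⟨x :: l1, l2, by rw [ht]; rfl, ?_⟩
      intro y hy
      rcases List.mem_cons.mp hy with rfl | hyl
      · exact hma
      · exact hl1 y hyl

lemma tfRangeFirst (l1 l2 : List Int) (m : Int)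
    (h : PySem.List.pyRange 0 8 = l1 ++ m :: l2) (j : Int) (h0 : 0 ≤ j) (hj : j < m) :
    j ∈ l1 := by
  rw [tfRange8] at h
  have hmem_m : m ∈ ([0, 1, 2, 3, 4, 5, 6, 7] : List Int) := by rw [h]; simp
  have hm8 : m < 8 := by simp only [List.mem_cons, List.not_mem_nil, or_false] at hmem_m; omega
  have hmem_j : j ∈ ([0, 1, 2, 3, 4, 5, 6, 7] : List Int) := by
    simp only [List.mem_cons, List.not_mem_nil, or_false]; omega
  rw [h] at hmem_j
  have hpw : (l1 ++ m :: l2).Pairwise (· < ·) := by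
    rw [← h]; decide
  rcases List.mem_append.mp hmem_j with hjl | hjr
  · exact hjl
  · rcases List.mem_cons.mp hjr with rfl | hjl2
    · omega
    · have := List.rel_of_pairwise_cons (List.pairwise_append.mp hpw).2.1 hjl2
      omega

-- head of Python's stable sort is Python's min (the FIRST minimal element)
lemma tfHeadInsert {α : Type} (key : α → Int) (x : α) (ys : List α) :
    (PySem.List.insertBy (fun a b => decide (key a < key b)) x ys).head? =
      tfMinStep key ys.head? x := by
  cases ys with
  | nil => rfl
  | cons y t =>
    simp only [PySem.List.insertBy, tfMinStep, List.head?]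
    split_ifs with h <;> simp_all

lemma tfFoldHead {α : Type} (key : α → Int) :
    ∀ (xs : List α) (acc : List α),
      (xs.foldl (fun a x => PySem.List.insertBy (fun a b => decide (key a < key b)) x a) acc).head?
        = xs.foldl (tfMinStep key) acc.head? := by
  intro xs
  induction xs with
  | nil => intro acc; rfl
  | cons x t ih =>
    intro acc
    simp only [List.foldl_cons]
    rw [ih, tfHeadInsert]

lemma tfHeadSorted {α : Type} (xs : List α) (key : α → Int) :
    (PySem.List.sorted xs key false).head? = PySem.List.min? xs key := by
  rw [PySem.List.sorted_eq_foldl_insertBy, tfMin?_eq_foldl]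
  exact tfFoldHead key xs []

lemma tfMin?Map {α β : Type} (h : β → α) (f : α → Int) (l : List β) :
    PySem.List.min? (l.map h) f = (PySem.List.min? l (fun j => f (h j))).map h := by
  rw [tfMin?_eq_foldl, tfMin?_eq_foldl]
  have aux : ∀ (l : List β) (acc : Option β),
      (l.map h).foldl (tfMinStep f) (acc.map h)
        = (l.foldl (tfMinStep (fun j => f (h j))) acc).map h := by
    intro l
    induction l with
    | nil => intro acc; rfl
    | cons x t ih =>
      intro acc
      simp only [List.map_cons, List.foldl_cons]
      rw [← ih]
      congr 1
      cases acc with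
      | none => rfl
      | some m => simp only [tfMinStep, Option.map_some]; split_ifs <;> rfl
  exact aux l none

lemma tfMin?Congr {α : Type} (l : List α) (k1 k2 : α → Int) (hk : ∀ x ∈ l, k1 x = k2 x) :
    PySem.List.min? l k1 = PySem.List.min? l k2 := by
  rw [tfMin?_eq_foldl, tfMin?_eq_foldl]
  have aux : ∀ (l : List α), (∀ x ∈ l, k1 x = k2 x) → ∀ (acc : Option α),
      (∀ m, acc = some m → k1 m = k2 m) →
      l.foldl (tfMinStep k1) acc = l.foldl (tfMinStep k2) acc := by
    intro l
    induction l with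
    | nil => intros; rfl
    | cons x t ih =>
      intro hl acc hacc
      simp only [List.foldl_cons]
      have hx : k1 x = k2 x := hl x (by simp)
      have hstep : tfMinStep k1 acc x = tfMinStep k2 acc x := by
        cases acc with
        | none => rfl
        | some m => simp only [tfMinStep, hx, hacc m rfl]
      rw [hstep]
      refine ih (fun y hy => hl y (by simp [hy])) _ ?_
      intro m hm
      cases acc with
      | none =>
        simp only [tfMinStep] at hm
        cases hm; exact hx
      | some m0 =>
        simp only [tfMinStep] at hm
        split_ifs at hm
        · cases hm; exact hx
        · cases hm; exact hacc _ rfl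
  exact aux l hk none (by intro m hm; cases hm)

-- ---- the A-side dict bookkeeping (badge_classes as classes.zip counts) ----

lemma tfZipSet :
    ∀ (ks : List String) (vs : List Int) (j : Nat) (v : Int), ks.Nodup → j < ks.length →
      vs.length = ks.length →
      (ks.zip vs).map (fun p => if p.1 == ks.getD j "" then (ks.getD j "", v) else p)
        = ks.zip (vs.set j v) := by
  intro ks
  induction ks with
  | nil => intro vs j v _ hj _; simp at hj
  | cons k kt ih =>
    intro vs j v hnd hj hlen
    cases vs with
    | nil => simp at hlen
    | cons v0 vt =>
      cases j with
      | zero =>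
        simp only [List.getD_cons_zero, List.zip_cons_cons, List.map_cons, List.set_cons_zero]
        rw [if_pos (by simp)]
        congr 1
        have hfix : ∀ p ∈ kt.zip vt, (if p.1 == k then (k, v) else p) = p := by
          intro p hp
          have hpk : p.1 ∈ kt := (List.of_mem_zip hp).1
          have hne : p.1 ≠ k := fun e => (List.nodup_cons.mp hnd).1 (e ▸ hpk)
          simp [hne]
        calc (kt.zip vt).map _ = (kt.zip vt).map id := List.map_congr_left (by simpa using hfix)
          _ = kt.zip vt := List.map_id _
      | succ j' =>
        simp only [List.getD_cons_succ, List.zip_cons_cons, List.map_cons, List.set_cons_succ]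
        have hj' : j' < kt.length := by simpa using hj
        have hmem : kt.getD j' "" ∈ kt := by
          rw [List.getD_eq_getElem _ _ hj']; exact List.getElem_mem hj'
        have hne : k ≠ kt.getD j' "" := fun e => (List.nodup_cons.mp hnd).1 (e ▸ hmem)
        rw [if_neg (by simpa using hne)]
        rw [ih vt j' v (List.nodup_cons.mp hnd).2 hj' (by simpa using hlen)]

lemma tfGetDZip (bc : PySem.Dict String Int) (ks : List String) (vs : List Int)
    (hitems : bc.items = ks.zip vs) (hnd : ks.Nodup) (hlen : vs.length = ks.length)
    (j : Nat) (hj : j < ks.length) :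
    bc.getD (ks.getD j "") 0 = vs.getD j 0 := by
  have hjv : j < vs.length := by omega
  have hkeys : bc.keys = ks := by
    show bc.items.map Prod.fst = ks
    rw [hitems]; exact List.map_fst_zip (by omega)
  have hmem : (ks.getD j "", vs.getD j 0) ∈ bc.items := by
    have hz : j < (ks.zip vs).length := by simp [List.length_zip]; omega
    have : (ks.getD j "", vs.getD j 0) = (ks.zip vs)[j] := by
      rw [List.getD_eq_getElem _ _ hj, List.getD_eq_getElem _ _ hjv]
      exact (List.getElem_zip (h := hz)).symm
    rw [hitems, this]
    exact List.getElem_mem hz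
  exact PySem.Dict.getD_of_mem_items bc hmem (hkeys ▸ hnd) 0

lemma tfClasses_nodup : tfClasses.Nodup := by decide

lemma tfClasses_eq_map : tfClasses =
    (PySem.List.pyRange 0 8).map (fun j : Int => tfClasses.getD j.toNat "") := by decide

lemma tfKeys (bc : PySem.Dict String Int) (counts : List Int)
    (h1 : bc.items = tfClasses.zip counts) (h2 : counts.length = 8) : bc.keys = tfClasses := by
  show bc.items.map Prod.fst = tfClasses
  rw [h1]; exact List.map_fst_zip (by rw [h2]; decide)

lemma tfModItems (bc : PySem.Dict String Int) (counts : List Int)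
    (h1 : bc.items = tfClasses.zip counts) (h2 : counts.length = 8) (j : Nat) (hj : j < 8) :
    (bc.modify (tfClasses.getD j "") 0 (· + 1)).items
      = tfClasses.zip (counts.set j (counts.getD j 0 + 1)) := by
  have hjk : j < tfClasses.length := by rw [show tfClasses.length = 8 from rfl]; omega
  have hcont : bc.contains (tfClasses.getD j "") = true := by
    rw [PySem.Dict.contains_eq_decide_mem_keys, tfKeys bc counts h1 h2]
    simp only [decide_eq_true_eq]
    rw [List.getD_eq_getElem _ _ hjk]
    exact List.getElem_mem hjk
  have hget : bc.getD (tfClasses.getD j "") 0 = counts.getD j 0 :=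
    tfGetDZip bc tfClasses counts h1 tfClasses_nodup (by rw [h2]; rfl) j hjk
  show (bc.insert (tfClasses.getD j "") (bc.getD (tfClasses.getD j "") 0 + 1)).items = _
  rw [PySem.Dict.items_insert_of_contains bc _ hcont, hget, h1]
  exact tfZipSet tfClasses counts j _ tfClasses_nodup hjk (by rw [h2]; rfl)

-- A's sorted-head selection, named through the first minimum of the counts
lemma tfSelect (bc : PySem.Dict String Int) (counts : List Int)
    (h1 : bc.items = tfClasses.zip counts) (h2 : counts.length = 8) :
    ∃ i : Int, 0 ≤ i ∧ i < 8 ∧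
      PySem.List.min? (PySem.List.pyRange 0 8) (fun j => PySem.List.pyGetD counts j 0) = some i ∧
      (PySem.List.sorted bc.keys (fun k => bc.getD k 0) false).headD "" = tfClasses.getD i.toNat "" := by
  rcases hmin : PySem.List.min? (PySem.List.pyRange 0 8)
      (fun j => PySem.List.pyGetD counts j 0) with _ | i
  · exact absurd ((PySem.List.min?_eq_none_iff _ _).mp hmin) (by decide)
  have hiR : i ∈ PySem.List.pyRange 0 8 := PySem.List.min?_mem hmin
  have hib : 0 ≤ i ∧ i < 8 := PySem.List.mem_pyRange_one.mp hiR
  refine ⟨i, hib.1, hib.2, rfl, ?_⟩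
  have hcong : ∀ j ∈ PySem.List.pyRange 0 8,
      bc.getD (tfClasses.getD j.toNat "") 0 = PySem.List.pyGetD counts j 0 := by
    intro j hjR
    have hjb := PySem.List.mem_pyRange_one.mp hjR
    rw [PySem.List.pyGetD_of_nonneg _ _ hjb.1]
    have hjN : j.toNat < tfClasses.length := by
      rw [show tfClasses.length = 8 from rfl]; omega
    rw [tfGetDZip bc tfClasses counts h1 tfClasses_nodup (by rw [h2]; rfl) j.toNat hjN]
  have hsel : PySem.List.min? bc.keys (fun k => bc.getD k 0)
      = (PySem.List.min? (PySem.List.pyRange 0 8)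
          (fun j => PySem.List.pyGetD counts j 0)).map (fun j : Int => tfClasses.getD j.toNat "") := by
    rw [tfKeys bc counts h1 h2]
    conv_lhs => rw [tfClasses_eq_map]
    rw [tfMin?Map]
    rw [tfMin?Congr (PySem.List.pyRange 0 8) _ _ hcong]
  rw [List.headD_eq_head?_getD, tfHeadSorted, hsel, hmin]
  rfl

-- ---- B's queue head is exactly that first minimum ----

lemma tfHeadPq (counts : List Int) (pq : List (Int × Int)) (m : Int)
    (hperm : pq.Perm (tfPairs counts)) (hpw : pq.Pairwise (fun a b => tfTupLt a b = true))
    (hmin : PySem.List.min? (PySem.List.pyRange 0 8)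
      (fun j => PySem.List.pyGetD counts j 0) = some m) :
    pq.head? = some (PySem.List.pyGetD counts m 0, m) := by
  have hmR : m ∈ PySem.List.pyRange 0 8 := PySem.List.min?_mem hmin
  have hmb : 0 ≤ m ∧ m < 8 := PySem.List.mem_pyRange_one.mp hmR
  have hle : ∀ j ∈ PySem.List.pyRange 0 8,
      PySem.List.pyGetD counts m 0 ≤ PySem.List.pyGetD counts j 0 :=
    PySem.List.min?_isMin hmin
  obtain ⟨l1, l2, hdec, hl1⟩ := tfMinFirst _ _ _ hmin
  have hstrict : ∀ j : Int, 0 ≤ j → j < m →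
      PySem.List.pyGetD counts m 0 < PySem.List.pyGetD counts j 0 := by
    intro j hj0 hjm
    exact hl1 j (tfRangeFirst l1 l2 m hdec j hj0 hjm)
  have hlen : pq.length = 8 := by rw [hperm.length_eq, tfPairs_length]
  cases hq : pq with
  | nil => rw [hq] at hlen; simp at hlen
  | cons h t =>
    have hmemh : h ∈ tfPairs counts := hperm.mem_iff.mp (by rw [hq]; simp)
    obtain ⟨j0, hj00, hj08, hh⟩ := tfPairs_mem_inv counts h hmemh
    have hpmem : (PySem.List.pyGetD counts m 0, m) ∈ pq :=
      hperm.mem_iff.mpr (tfMemPairs counts m hmb.1 hmb.2)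
    rw [hq] at hpmem
    rcases List.mem_cons.mp hpmem with he | ht
    · rw [← he]; rfl
    · exfalso
      have hlt := List.rel_of_pairwise_cons (hq ▸ hpw) ht
      rw [hh] at hlt
      simp only [tfTupLt, Bool.or_eq_true, Bool.and_eq_true, decide_eq_true_eq, beq_iff_eq] at hlt
      have hjle := hle j0 (PySem.List.mem_pyRange_one.mpr ⟨hj00, hj08⟩)
      rcases hlt with hlt | ⟨heq, hjm⟩
      · omega
      · have := hstrict j0 hj00 hjm
        omega

-- ---- the queue update (pop at k, re-insert at the sorted position) ----

lemma tfUpdate (counts : List Int) (pq : List (Int × Int)) (i : Int) (k : Nat)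
    (hlen : counts.length = 8)
    (hperm : pq.Perm (tfPairs counts)) (hpw : pq.Pairwise (fun a b => tfTupLt a b = true))
    (h0 : 0 ≤ i) (h8 : i < 8) (hk : k < pq.length)
    (hke : pq[k] = (PySem.List.pyGetD counts i 0, i)) :
    ((pq.eraseIdx k).insertIdx
        (tfInsPos (pq.eraseIdx k) (PySem.List.pyGetD counts i 0 + 1, i))
        (PySem.List.pyGetD counts i 0 + 1, i)).Perm
      (tfPairs (counts.set i.toNat (PySem.List.pyGetD counts i 0 + 1))) ∧
    ((pq.eraseIdx k).insertIdx
        (tfInsPos (pq.eraseIdx k) (PySem.List.pyGetD counts i 0 + 1, i))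
        (PySem.List.pyGetD counts i 0 + 1, i)).Pairwise (fun a b => tfTupLt a b = true) := by
  set e : Int × Int := (PySem.List.pyGetD counts i 0, i) with he
  set c : Int := PySem.List.pyGetD counts i 0 + 1 with hcdef
  -- decomposition of pq around position k
  have hdec : pq.take k ++ e :: pq.drop (k + 1) = pq := by
    rw [← hke]
    rw [show pq[k] :: pq.drop (k + 1) = pq.drop k from List.getElem_cons_drop hk]
    exact List.take_append_drop k pq
  have herase : pq.eraseIdx k = pq.take k ++ pq.drop (k + 1) :=
    List.eraseIdx_eq_take_drop_succ pq k
  have hpq_e : pq.Perm (e :: pq.eraseIdx k) := by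
    conv_lhs => rw [← hdec]
    rw [herase]
    exact List.perm_middle
  -- snd components of pq are the eight indices, without duplicates
  have hsnodup : (pq.map Prod.snd).Nodup := by
    have h := (hperm.map Prod.snd).nodup_iff
    rw [tfPairs_map_snd] at h
    exact h.mpr (by decide)
  have hnodup : pq.Nodup := List.Nodup.of_map Prod.snd hsnodup
  have hememb : e ∈ pq := by rw [← hdec]; simp
  -- no element of the erased queue carries index i
  have hdisj : ∀ y ∈ pq.eraseIdx k, y.2 ≠ (c, i).2 := by
    intro y hy hyi
    have hymem : y ∈ pq := (List.eraseIdx_sublist pq k).subset hy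
    have hye : y = e := List.inj_on_of_nodup_map hsnodup hymem hememb (by rw [hyi, he])
    subst hye
    have hnd2 := List.nodup_middle.mp (by rw [hdec]; exact hnodup)
    rw [herase] at hy
    exact (List.nodup_cons.mp hnd2).1 hy
  -- decomposition of the pairs list around index i
  have hiN : i.toNat < (tfPairs counts).length := by rw [tfPairs_length]; omega
  have hpe : (tfPairs counts)[i.toNat] = e := tfPairs_getElem_eq counts i hlen h0 h8 hiN
  have hpairs_dec : (tfPairs counts).take i.toNat ++ e :: (tfPairs counts).drop (i.toNat + 1)
      = tfPairs counts := by
    rw [← hpe]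
    rw [show (tfPairs counts)[i.toNat] :: (tfPairs counts).drop (i.toNat + 1)
        = (tfPairs counts).drop i.toNat from List.getElem_cons_drop hiN]
    exact List.take_append_drop i.toNat (tfPairs counts)
  have hset_dec : tfPairs (counts.set i.toNat c)
      = (tfPairs counts).take i.toNat ++ (c, i) :: (tfPairs counts).drop (i.toNat + 1) := by
    rw [tfPairs_set counts i c hlen h0 h8]
    exact List.set_eq_take_cons_drop _ hiN
  -- the erased queue is a permutation of the pairs with index i removed
  have hperm_er : (pq.eraseIdx k).Perm
      ((tfPairs counts).take i.toNat ++ (tfPairs counts).drop (i.toNat + 1)) := by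
    have h1 : (e :: pq.eraseIdx k).Perm
        (e :: ((tfPairs counts).take i.toNat ++ (tfPairs counts).drop (i.toNat + 1))) := by
      refine (hpq_e.symm.trans hperm).trans ?_
      conv_lhs => rw [← hpairs_dec]
      exact List.perm_middle
    exact h1.cons_inv
  constructor
  · -- permutation with the updated pairs
    refine (List.perm_insertIdx (c, i) _ (tfInsPos_le _ _)).trans ?_
    rw [hset_dec]
    exact ((hperm_er.cons (c, i)).trans List.perm_middle.symm)
  · -- sortedness is restored by the positional insert
    exact tfInsert_pairwise _ _ (List.Pairwise.sublist (List.eraseIdx_sublist pq k) hpw) hdisj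

-- ---- the coupling invariant between A's loop state and B's loop state ----

def tfR (pre : List String) (a : PySem.Dict String Int × PySem.Dict String String × List String)
    (b : List (Int × Int) × PySem.Dict String Int) : Prop :=
  ∃ counts : List Int,
    counts.length = 8 ∧
    a.1.items = tfClasses.zip counts ∧
    b.1.Perm (tfPairs counts) ∧
    b.1.Pairwise (fun x y => tfTupLt x y = true) ∧
    (∀ t : String, a.2.1.get? t = (b.2.get? t).map (fun i => tfClasses.getD i.toNat "")) ∧
    (∀ (t : String) (i : Int), b.2.get? t = some i → 0 ≤ i ∧ i < 8) ∧
    a.2.2 = pre.map (tfRender b.2) ∧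
    (∀ t ∈ pre, (b.2.get? t).isSome = true)

-- one loop iteration preserves the coupling invariant
set_option maxHeartbeats 1000000 in
lemma tfStep (pre : List String)
    (a : PySem.Dict String Int × PySem.Dict String String × List String)
    (b : List (Int × Int) × PySem.Dict String Int) (tag : String)
    (h : tfR pre a b) : tfR (pre ++ [tag]) (tfStepA a tag) (tfStepB b tag) := by
  obtain ⟨counts, hlen, hitems, hperm, hpw, hmap, hbnd, hres, hsome⟩ := h
  obtain ⟨bc, tbm, res⟩ := a
  obtain ⟨pq, asg⟩ := b
  simp only at hitems hperm hpw hmap hbnd hres hsome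
  have hpqlen : pq.length = 8 := by rw [hperm.length_eq, tfPairs_length]
  rcases hc : asg.get? tag with _ | i
  · -- tag not seen before: A picks the sorted head, B pops the queue head
    obtain ⟨m, hm0, hm8, hmin, hheadA⟩ := tfSelect bc counts hitems hlen
    have hhead : pq.head? = some (PySem.List.pyGetD counts m 0, m) :=
      tfHeadPq counts pq m hperm hpw hmin
    have hk0 : 0 < pq.length := by omega
    have hke : pq[0] = (PySem.List.pyGetD counts m 0, m) := by
      cases pq with
      | nil => simp at hk0
      | cons p t => exact Option.some.inj (by simpa using hhead)
    have hheadD : pq.headD (0, 0) = (PySem.List.pyGetD counts m 0, m) := by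
      rw [List.headD_eq_head?_getD, hhead]; rfl
    have hgd0 : pq.getD 0 (0, 0) = (PySem.List.pyGetD counts m 0, m) := by
      rw [List.getD_eq_getElem _ _ hk0, hke]
    have hA : tbm.get? tag = none := by rw [hmap tag, hc]; rfl
    obtain ⟨hperm', hpw'⟩ := tfUpdate counts pq m 0 hlen hperm hpw hm0 hm8 hk0 hke
    have hstepA : tfStepA (bc, tbm, res) tag =
        (bc.modify (tfClasses.getD m.toNat "") 0 (· + 1),
         tbm.insert tag (tfClasses.getD m.toNat ""),
         res ++ ["<span class=\"badge mr-1 " ++ tfClasses.getD m.toNat "" ++ "\">" ++ tag ++ "</span>"]) := by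
      simp only [tfStepA]
      rw [hA]
      simp only [Option.getD_none]
      rw [hheadA]
    have hstepB : tfStepB (pq, asg) tag =
        ((pq.eraseIdx 0).insertIdx
           (tfInsPos (pq.eraseIdx 0) (PySem.List.pyGetD counts m 0 + 1, m))
           (PySem.List.pyGetD counts m 0 + 1, m),
         asg.insert tag m) := by
      simp only [tfStepB]
      rw [hc]
      simp only
      rw [hheadD, hgd0]
    rw [hstepA, hstepB]
    refine ⟨counts.set m.toNat (PySem.List.pyGetD counts m 0 + 1), ?_, ?_, ?_, ?_, ?_, ?_, ?_, ?_⟩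
    · simp [hlen]
    · show (bc.modify _ 0 (· + 1)).items = _
      rw [tfModItems bc counts hitems hlen m.toNat (by omega)]
      rw [PySem.List.pyGetD_of_nonneg _ _ hm0]
    · exact hperm'
    · exact hpw'
    · intro t
      show (tbm.insert tag _).get? t = ((asg.insert tag m).get? t).map _
      rw [PySem.Dict.get?_insert, PySem.Dict.get?_insert]
      split_ifs with ht
      · rfl
      · exact hmap t
    · intro t v hv
      show 0 ≤ v ∧ v < 8
      rw [PySem.Dict.get?_insert] at hv
      split_ifs at hv with ht
      · cases hv; omega
      · exact hbnd t v hv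
    · show res ++ _ = (pre ++ [tag]).map (tfRender (asg.insert tag m))
      rw [List.map_append]
      have hpre : pre.map (tfRender (asg.insert tag m)) = pre.map (tfRender asg) := by
        refine List.map_congr_left ?_
        intro t htp
        have hne : t ≠ tag := by
          intro hteq
          have hs := hsome t htp
          rw [hteq, hc] at hs
          simp at hs
        unfold tfRender
        rw [PySem.Dict.getD_insert, if_neg hne]
      rw [hpre, ← hres]
      have htag : tfRender (asg.insert tag m) tag
          = "<span class=\"badge mr-1 " ++ tfClasses.getD m.toNat "" ++ "\">" ++ tag ++ "</span>" := by
        unfold tfRender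
        rw [PySem.Dict.getD_insert, if_pos rfl, PySem.List.pyGetD_of_nonneg _ _ hm0]
      rw [List.map_cons, List.map_nil, htag]
    · intro t htp
      show ((asg.insert tag m).get? t).isSome = true
      rcases List.mem_append.mp htp with htp | htp
      · rw [PySem.Dict.get?_insert]
        split_ifs with ht
        · rfl
        · exact hsome t htp
      · have hteq : t = tag := by simpa using htp
        rw [hteq, PySem.Dict.get?_insert, if_pos rfl]
        rfl
  · -- cached tag: both update the class the cache names
    obtain ⟨hi0, hi8⟩ := hbnd tag i hc
    have hememb : (PySem.List.pyGetD counts i 0, i) ∈ pq :=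
      hperm.mem_iff.mpr (tfMemPairs counts i hi0 hi8)
    have hsnodup : (pq.map Prod.snd).Nodup := by
      have hnd := (hperm.map Prod.snd).nodup_iff
      rw [tfPairs_map_snd] at hnd
      exact hnd.mpr (by decide)
    have hex : ∃ y ∈ pq, (fun e : Int × Int => e.2 == i) y = true := ⟨_, hememb, by simp⟩
    have hk : pq.findIdx (fun e => e.2 == i) < pq.length := List.findIdx_lt_length_of_exists hex
    have hpk : (pq[pq.findIdx (fun e => e.2 == i)]'hk).2 = i := by
      have hg := List.findIdx_getElem (w := hk)
      simpa using hg
    have hke : pq[pq.findIdx (fun e => e.2 == i)]'hk = (PySem.List.pyGetD counts i 0, i) :=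
      List.inj_on_of_nodup_map hsnodup (List.getElem_mem hk) hememb (by rw [hpk])
    have hgdk : pq.getD (pq.findIdx (fun e => e.2 == i)) (0, 0)
        = (PySem.List.pyGetD counts i 0, i) := by
      rw [List.getD_eq_getElem _ _ hk, hke]
    have hA : tbm.get? tag = some (tfClasses.getD i.toNat "") := by rw [hmap tag, hc]; rfl
    obtain ⟨hperm', hpw'⟩ := tfUpdate counts pq i _ hlen hperm hpw hi0 hi8 hk hke
    have hstepA : tfStepA (bc, tbm, res) tag =
        (bc.modify (tfClasses.getD i.toNat "") 0 (· + 1),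
         tbm.insert tag (tfClasses.getD i.toNat ""),
         res ++ ["<span class=\"badge mr-1 " ++ tfClasses.getD i.toNat "" ++ "\">" ++ tag ++ "</span>"]) := by
      simp only [tfStepA]
      rw [hA]
      simp only [Option.getD_some]
    have hstepB : tfStepB (pq, asg) tag =
        ((pq.eraseIdx (pq.findIdx (fun e => e.2 == i))).insertIdx
           (tfInsPos (pq.eraseIdx (pq.findIdx (fun e => e.2 == i)))
             (PySem.List.pyGetD counts i 0 + 1, i))
           (PySem.List.pyGetD counts i 0 + 1, i),
         asg) := by
      simp only [tfStepB]
      rw [hc]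
      simp only
      rw [hgdk]
    rw [hstepA, hstepB]
    refine ⟨counts.set i.toNat (PySem.List.pyGetD counts i 0 + 1), ?_, ?_, ?_, ?_, ?_, ?_, ?_, ?_⟩
    · simp [hlen]
    · show (bc.modify _ 0 (· + 1)).items = _
      rw [tfModItems bc counts hitems hlen i.toNat (by omega)]
      rw [PySem.List.pyGetD_of_nonneg _ _ hi0]
    · exact hperm'
    · exact hpw'
    · intro t
      show (tbm.insert tag _).get? t = (asg.get? t).map _
      rw [PySem.Dict.get?_insert]
      split_ifs with ht
      · rw [ht, hc]; rfl
      · exact hmap t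
    · intro t v hv
      exact hbnd t v hv
    · show res ++ _ = (pre ++ [tag]).map (tfRender asg)
      rw [List.map_append, ← hres]
      have htag : tfRender asg tag
          = "<span class=\"badge mr-1 " ++ tfClasses.getD i.toNat "" ++ "\">" ++ tag ++ "</span>" := by
        unfold tfRender
        rw [PySem.Dict.getD_eq_get?_getD, hc, Option.getD_some,
          PySem.List.pyGetD_of_nonneg _ _ hi0]
      rw [List.map_cons, List.map_nil, htag]
    · intro t htp
      show (asg.get? t).isSome = true
      rcases List.mem_append.mp htp with htp | htp
      · exact hsome t htp
      · have hteq : t = tag := by simpa using htp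
        rw [hteq, hc]
        rfl

lemma tfFold : ∀ (ts pre : List String) a b, tfR pre a b →
    tfR (pre ++ ts) (ts.foldl tfStepA a) (ts.foldl tfStepB b) := by
  intro ts
  induction ts with
  | nil => intro pre a b h; simpa using h
  | cons t ts ih =>
    intro pre a b h
    simp only [List.foldl_cons]
    have h' := ih (pre ++ [t]) _ _ (tfStep pre a b t h)
    simpa using h'

lemma tfInit : tfR [] (tfBadge0, PySem.Dict.empty, [])
    ((PySem.List.pyRange 0 8).map (fun i => ((0 : Int), i)), PySem.Dict.empty) := by
  refine ⟨List.replicate 8 0, by decide, by decide, ?_, by decide, ?_, ?_, rfl, by simp⟩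
  · exact List.Perm.of_eq (by decide)
  · intro t; simp [PySem.Dict.get?_empty]
  · intro t i h; simp [PySem.Dict.get?_empty] at h

-- ===== VERDICT (by name: the statement is the Claim_ definition above) =====
theorem tag_format_spec : Claim_equal_tag_format := by
  intro tags _
  unfold Spec_tag_format tag_format tag_format_alt
  have h := tfFold tags [] _ _ tfInit
  rw [List.nil_append] at h
  obtain ⟨counts, _, _, _, _, _, _, hres, _⟩ := h
  show PySem.Str.join "" (tags.foldl tfStepA (tfBadge0, PySem.Dict.empty, [])).2.2 = _
  rw [hres]
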